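-- pv_equiv track=rewrite | github.com/FlorenciaCorrea/lexer | lexer.py | a_sino
-- ===== SOURCE A (Python) =====
-- def a_sino(word): #
-- 	s = 0
-- 	for c in word:
-- 		if s == 0 and c == 's':
-- 			s = 1
-- 		elif s == 1 and c == 'i':
-- 			s = 2
-- 		elif s == 2 and c == 'n':
-- 			s = 3
-- 		elif s == 3 and c == 'o':
-- 			s = 4
-- 		else:
-- 			s = -1
-- 			break
-- 	return s == 4
-- ===== SOURCE B (Python) =====
-- def a_sino(word):
--     return list(word) == ['s', 'i', 'n', 'o']
-- ===== Notes on version B (the rewrite author's own statement) =====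
-- stated objective: simpler
-- what changed: Replaces the per-character state-machine loop with materializing the input and a single sequence equality against ['s','i','n','o'].
import Mathlib
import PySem

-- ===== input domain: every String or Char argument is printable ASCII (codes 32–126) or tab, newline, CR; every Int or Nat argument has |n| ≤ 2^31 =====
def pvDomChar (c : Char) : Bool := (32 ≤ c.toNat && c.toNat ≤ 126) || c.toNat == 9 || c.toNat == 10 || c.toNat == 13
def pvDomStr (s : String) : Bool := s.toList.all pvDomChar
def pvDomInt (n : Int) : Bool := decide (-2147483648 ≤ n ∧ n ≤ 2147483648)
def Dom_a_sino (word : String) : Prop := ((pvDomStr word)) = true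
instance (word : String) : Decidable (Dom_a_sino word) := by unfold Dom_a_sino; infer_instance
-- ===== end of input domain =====

-- B replaces A's per-character state machine with one direct equality against the list ['s','i','n','o'] (simpler).

-- ===== PORT A =====
-- loop over the characters keeping the integer state s; the Python `break` after s = -1
-- is transcribed by returning -1 immediately (no further transitions happen).
def a_sino_loop (s : Int) : List Char → Int
  | [] => s
  | c :: cs =>
    if s == 0 && c == 's' then a_sino_loop 1 cs
    else if s == 1 && c == 'i' then a_sino_loop 2 cs
    else if s == 2 && c == 'n' then a_sino_loop 3 cs
    else if s == 3 && c == 'o' then a_sino_loop 4 cs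
    else -1

def a_sino (word : String) : Bool := a_sino_loop 0 word.toList == 4

-- ===== PORT B =====
def a_sino_alt (word : String) : Bool := word.toList == ['s', 'i', 'n', 'o']

-- ===== PRECONDITION & SPEC =====
def Spec_a_sino (word : String) (out : Bool) : Prop := out = a_sino_alt word
instance (word : String) (out : Bool) : Decidable (Spec_a_sino word out) := by unfold Spec_a_sino; infer_instance

-- ===== CLAIM (what is proved, stated in full; the proofs are below) =====
def Claim_equal_a_sino : Prop := ∀ (word : String), Dom_a_sino word → Spec_a_sino word (a_sino word)

-- ===== LEMMAS AND PROOFS =====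
theorem a_sino_loop_eq_four (l : List Char) : (a_sino_loop 0 l = 4) ↔ l = ['s', 'i', 'n', 'o'] := by
  match l with
  | [] => simp [a_sino_loop]
  | c1 :: l1 =>
    by_cases h1 : c1 = 's'
    · subst h1
      match l1 with
      | [] => simp [a_sino_loop]
      | c2 :: l2 =>
        by_cases h2 : c2 = 'i'
        · subst h2
          match l2 with
          | [] => simp [a_sino_loop]
          | c3 :: l3 =>
            by_cases h3 : c3 = 'n'
            · subst h3
              match l3 with
              | [] => simp [a_sino_loop]
              | c4 :: l4 =>
                by_cases h4 : c4 = 'o'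
                · subst h4
                  match l4 with
                  | [] => simp [a_sino_loop]
                  | c5 :: l5 => simp [a_sino_loop]
                · simp [a_sino_loop, h4]
            · simp [a_sino_loop, h3]
        · simp [a_sino_loop, h2]
    · simp [a_sino_loop, h1]

-- ===== VERDICT (by name: the statement is the Claim_ definition above) =====
theorem a_sino_spec : Claim_equal_a_sino := by
  intro word _
  unfold Spec_a_sino a_sino a_sino_alt
  by_cases h : word.toList = ['s', 'i', 'n', 'o']
  · simp [h]
    decide
  · have := (not_iff_not.mpr (a_sino_loop_eq_four word.toList)).mpr h
    simp [h, this]
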